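-- pv_equiv track=rewrite | github.com/TVLuke/kennzeichen_buch | kfz_puzzle_generator.py | finde_loesungen_fuer_wort
-- ===== SOURCE A (Python) =====
-- def finde_loesungen_fuer_wort(wort, codes, verwendete_codes, position=0, aktuelle_loesung=None):
--     """
--     Rekursive Funktion, um alle möglichen Lösungen für ein Wort zu finden.
--
--     Args:
--         wort: Das zu bildende Wort
--         codes: Liste der verfügbaren KFZ-Kennzeichen
--         verwendete_codes: Set der bereits verwendeten Codes (um Duplikate zu vermeiden)
--         position: Aktuelle Position im Wort
--         aktuelle_loesung: Liste der bisher verwendeten Codes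
--
--     Returns:
--         Liste aller möglichen Lösungen
--     """
--     if aktuelle_loesung is None:
--         aktuelle_loesung = []
--
--     # Abbruchbedingung: Wenn das gesamte Wort gebildet wurde
--     if position >= len(wort):
--         return [aktuelle_loesung]
--
--     loesungen = []
--
--     # Versuche, die nächsten 1-3 Buchstaben mit einem Kennzeichen zu matchen
--     for laenge in range(1, 4):
--         if position + laenge > len(wort):
--             break
--
--         teil = wort[position:position+laenge]
--
--         # Prüfe, ob dieser Teil einem Kennzeichen entspricht
--         if teil in codes and teil not in verwendete_codes:
--             # Füge dieses Kennzeichen zur Lösung hinzu und suche weiter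
--             neue_verwendete_codes = verwendete_codes.copy()
--             neue_verwendete_codes.add(teil)
--             neue_loesung = aktuelle_loesung + [teil]
--
--             weitere_loesungen = finde_loesungen_fuer_wort(
--                 wort, codes, neue_verwendete_codes, position + laenge, neue_loesung
--             )
--
--             loesungen.extend(weitere_loesungen)
--
--     return loesungen
-- ===== SOURCE B (Python) =====
-- def finde_loesungen_fuer_wort(wort, codes, verwendete_codes, position=0, aktuelle_loesung=None):
--     """Suffix-solver: pure recursion over the remaining word, no accumulator.
--
--     Computes all decompositions of wort[pos:] into distinct unused codes,
--     building each solution back-to-front by consing, then prefixes the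
--     already-chosen codes once at the end.
--     """
--     prefix = [] if aktuelle_loesung is None else list(aktuelle_loesung)
--     n = len(wort)
--
--     def suffix_solutions(pos, used):
--         if pos >= n:
--             return [[]]
--         res = []
--         for l in (1, 2, 3):
--             if pos + l <= n:
--                 teil = wort[pos:pos + l]
--                 if teil in codes and teil not in used:
--                     res += [[teil] + rest
--                             for rest in suffix_solutions(pos + l, used | {teil})]
--         return res
--
--     return [prefix + s for s in suffix_solutions(position, verwendete_codes)]
-- ===== Notes on version B (the rewrite author's own statement) =====
-- stated objective: alternative
-- what changed: Replaced A's accumulator-threading recursion (each call carries the partial solution and appends the still-growing prefix at every branch) by a pure suffix solver: a helper returns all decompositions of the remaining word built back-to-front by consing, and the already-chosen prefix is attached once by a single map at the end; the length loop uses a guarded comprehension instead of break.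
import Mathlib
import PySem

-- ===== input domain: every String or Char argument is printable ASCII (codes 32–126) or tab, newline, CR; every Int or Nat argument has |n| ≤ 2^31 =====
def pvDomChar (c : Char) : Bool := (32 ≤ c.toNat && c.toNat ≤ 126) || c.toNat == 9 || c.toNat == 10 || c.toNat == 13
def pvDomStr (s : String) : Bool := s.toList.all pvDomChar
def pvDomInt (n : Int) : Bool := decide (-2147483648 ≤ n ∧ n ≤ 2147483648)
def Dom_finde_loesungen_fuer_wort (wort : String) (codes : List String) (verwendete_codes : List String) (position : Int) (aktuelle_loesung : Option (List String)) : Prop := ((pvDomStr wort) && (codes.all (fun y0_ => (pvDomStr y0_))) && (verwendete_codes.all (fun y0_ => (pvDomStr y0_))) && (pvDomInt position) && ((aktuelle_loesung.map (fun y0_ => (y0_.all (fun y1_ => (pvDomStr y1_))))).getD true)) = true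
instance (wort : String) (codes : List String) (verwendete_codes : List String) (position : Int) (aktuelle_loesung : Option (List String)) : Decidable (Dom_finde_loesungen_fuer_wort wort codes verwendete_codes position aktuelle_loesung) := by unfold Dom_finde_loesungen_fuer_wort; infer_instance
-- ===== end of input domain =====

-- B replaces A's accumulator-threading recursion by a pure suffix solver with one
-- final map attaching the prefix (objective: alternative decomposition, same cost).

-- ===== PORT A =====
-- Literal port of A: accumulator-passing recursion; the 1..3 length loop with its
-- break is transcribed as the nested early-exit conditionals, results extended in order.
def finde_loesungen_fuer_wort (wort : String) (codes : List String) (verwendete_codes : List String) (position : Int) (aktuelle_loesung : Option (List String)) : List (List String) :=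
  let aktuelle : List String := aktuelle_loesung.getD []
  if _h0 : position ≥ PySem.Str.len wort then [aktuelle]
  else
    -- laenge = 1
    if _h1 : position + 1 > PySem.Str.len wort then []   -- break: loesungen is still []
    else
      let teil1 := PySem.Str.slice wort (some position) (some (position + 1))
      let l1 : List (List String) :=
        if teil1 ∈ codes ∧ teil1 ∉ verwendete_codes then
          finde_loesungen_fuer_wort wort codes (PySem.Set.add verwendete_codes teil1) (position + 1) (some (aktuelle ++ [teil1]))
        else []
      -- laenge = 2
      if _h2 : position + 2 > PySem.Str.len wort then l1  -- break
      else
        let teil2 := PySem.Str.slice wort (some position) (some (position + 2))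
        let l2 : List (List String) :=
          if teil2 ∈ codes ∧ teil2 ∉ verwendete_codes then
            finde_loesungen_fuer_wort wort codes (PySem.Set.add verwendete_codes teil2) (position + 2) (some (aktuelle ++ [teil2]))
          else []
        -- laenge = 3
        if _h3 : position + 3 > PySem.Str.len wort then l1 ++ l2  -- break
        else
          let teil3 := PySem.Str.slice wort (some position) (some (position + 3))
          let l3 : List (List String) :=
            if teil3 ∈ codes ∧ teil3 ∉ verwendete_codes then
              finde_loesungen_fuer_wort wort codes (PySem.Set.add verwendete_codes teil3) (position + 3) (some (aktuelle ++ [teil3]))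
            else []
          l1 ++ l2 ++ l3
termination_by (PySem.Str.len wort - position).toNat
decreasing_by all_goals omega

-- ===== PORT B =====
-- B's helper: all decompositions of wort[pos:], built by consing (no accumulator).
def pvSuffixSolutions (wort : String) (codes : List String) (pos : Int) (used : List String) : List (List String) :=
  if _h : pos ≥ PySem.Str.len wort then [[]]
  else
    (if pos + 1 ≤ PySem.Str.len wort then
       let teil := PySem.Str.slice wort (some pos) (some (pos + 1))
       if teil ∈ codes ∧ teil ∉ used then
         (pvSuffixSolutions wort codes (pos + 1) (PySem.Set.add used teil)).map (teil :: ·)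
       else []
     else [])
    ++
    (if pos + 2 ≤ PySem.Str.len wort then
       let teil := PySem.Str.slice wort (some pos) (some (pos + 2))
       if teil ∈ codes ∧ teil ∉ used then
         (pvSuffixSolutions wort codes (pos + 2) (PySem.Set.add used teil)).map (teil :: ·)
       else []
     else [])
    ++
    (if pos + 3 ≤ PySem.Str.len wort then
       let teil := PySem.Str.slice wort (some pos) (some (pos + 3))
       if teil ∈ codes ∧ teil ∉ used then
         (pvSuffixSolutions wort codes (pos + 3) (PySem.Set.add used teil)).map (teil :: ·)
       else []
     else [])
termination_by (PySem.Str.len wort - pos).toNat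
decreasing_by all_goals omega

def finde_loesungen_fuer_wort_alt (wort : String) (codes : List String) (verwendete_codes : List String) (position : Int) (aktuelle_loesung : Option (List String)) : List (List String) :=
  let vorne : List String := aktuelle_loesung.getD []
  (pvSuffixSolutions wort codes position verwendete_codes).map (vorne ++ ·)

-- ===== PRECONDITION & SPEC =====
def Spec_finde_loesungen_fuer_wort (wort : String) (codes : List String) (verwendete_codes : List String) (position : Int) (aktuelle_loesung : Option (List String)) (out : List (List String)) : Prop := out = finde_loesungen_fuer_wort_alt wort codes verwendete_codes position aktuelle_loesung
instance (wort : String) (codes : List String) (verwendete_codes : List String) (position : Int) (aktuelle_loesung : Option (List String)) (out : List (List String)) : Decidable (Spec_finde_loesungen_fuer_wort wort codes verwendete_codes position aktuelle_loesung out) := by unfold Spec_finde_loesungen_fuer_wort; infer_instance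

-- ===== CLAIM (what is proved, stated in full; the proofs are below) =====
def Claim_equal_finde_loesungen_fuer_wort : Prop := ∀ (wort : String) (codes : List String) (verwendete_codes : List String) (position : Int) (aktuelle_loesung : Option (List String)), Dom_finde_loesungen_fuer_wort wort codes verwendete_codes position aktuelle_loesung → Spec_finde_loesungen_fuer_wort wort codes verwendete_codes position aktuelle_loesung (finde_loesungen_fuer_wort wort codes verwendete_codes position aktuelle_loesung)

-- ===== LEMMAS AND PROOFS =====

-- Main invariant: A equals the suffix solutions with the current partial solution mapped on.
lemma pv_key (wort : String) (codes : List String) :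
    ∀ (position : Int) (used : List String) (sol : Option (List String)),
      finde_loesungen_fuer_wort wort codes used position sol
        = (pvSuffixSolutions wort codes position used).map ((sol.getD []) ++ ·) := by
  intro position
  induction hk : ((wort.length : Int) - position).toNat using Nat.strong_induction_on
    generalizing position with
  | _ k ih =>
  intro used sol
  have hlen : PySem.Str.len wort = (wort.length : Int) := by simp
  have ih1 : position < (wort.length : Int) → ∀ (used' : List String) (sol' : Option (List String)),
      finde_loesungen_fuer_wort wort codes used' (position + 1) sol'
        = (pvSuffixSolutions wort codes (position + 1) used').map ((sol'.getD []) ++ ·) :=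
    fun h used' sol' => ih _ (by omega) _ rfl used' sol'
  have ih2 : position < (wort.length : Int) → ∀ (used' : List String) (sol' : Option (List String)),
      finde_loesungen_fuer_wort wort codes used' (position + 2) sol'
        = (pvSuffixSolutions wort codes (position + 2) used').map ((sol'.getD []) ++ ·) :=
    fun h used' sol' => ih _ (by omega) _ rfl used' sol'
  have ih3 : position < (wort.length : Int) → ∀ (used' : List String) (sol' : Option (List String)),
      finde_loesungen_fuer_wort wort codes used' (position + 3) sol'
        = (pvSuffixSolutions wort codes (position + 3) used').map ((sol'.getD []) ++ ·) :=
    fun h used' sol' => ih _ (by omega) _ rfl used' sol'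
  rw [finde_loesungen_fuer_wort, pvSuffixSolutions]
  split_ifs
  all_goals first
    | rfl
    | (exfalso; omega)
    | (simp; done)
    | (simp only []; split_ifs <;>
        simp [ih1 (by omega), ih2 (by omega), ih3 (by omega),
              List.map_map, Function.comp_def, List.append_assoc])

-- ===== VERDICT (by name: the statement is the Claim_ definition above) =====
theorem finde_loesungen_fuer_wort_spec : Claim_equal_finde_loesungen_fuer_wort := by
  intro wort codes verwendete_codes position aktuelle_loesung _
  show _ = _
  unfold finde_loesungen_fuer_wort_alt
  exact pv_key wort codes position verwendete_codes aktuelle_loesung
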